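-- pv_equiv track=rewrite | github.com/LukasHoste/algorithms-intro-excercises-tests | excercise2.py | sumOfEvenLucasNumbers
-- ===== SOURCE A (Python) =====
-- def sumOfEvenLucasNumbers(highestNumber):
--   n = 0
--   sum = 0
--   current = 2
--   if (highestNumber == 2):
--     sum = 2
--   # sum = 2
--   while current < highestNumber:
--     if current % 2 == 0:
--       sum += current
--     n += 1
--     current = luc(n)
--   return sum
--
-- def luc(n):
--   if n == 0:
--     return 2
--   elif n == 1:
--     return 1
--   else:
--     return luc(n-1) + luc(n-2)
-- ===== SOURCE B (Python) =====
-- def sumOfEvenLucasNumbers(highestNumber):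
--     if highestNumber == 2:
--         return 2
--     total = 0
--     a, b = 2, 1
--     while a < highestNumber:
--         if a % 2 == 0:
--             total += a
--         a, b = b, a + b
--     return total
-- ===== Notes on version B (the rewrite author's own statement) =====
-- stated objective: faster
-- what changed: B generates Lucas numbers iteratively keeping only the previous two terms instead of recomputing each term with the naive exponential double recursion luc(n).
import Mathlib
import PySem

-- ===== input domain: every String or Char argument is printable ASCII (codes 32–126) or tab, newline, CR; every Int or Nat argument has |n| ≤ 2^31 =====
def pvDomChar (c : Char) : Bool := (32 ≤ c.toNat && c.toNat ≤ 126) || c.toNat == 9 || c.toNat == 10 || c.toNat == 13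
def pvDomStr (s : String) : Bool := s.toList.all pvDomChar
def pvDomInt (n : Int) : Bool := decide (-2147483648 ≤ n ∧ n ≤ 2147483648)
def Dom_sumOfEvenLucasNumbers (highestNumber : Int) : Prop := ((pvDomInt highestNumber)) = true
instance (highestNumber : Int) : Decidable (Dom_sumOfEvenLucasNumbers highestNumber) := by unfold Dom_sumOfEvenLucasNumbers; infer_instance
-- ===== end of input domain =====

-- B replaces A's exponential recursive luc(n) calls by iterative generation of the
-- Lucas sequence keeping the previous two terms (objective: faster, asymptotic).

-- ===== PORT A =====
-- luc, A's naive doubly-recursive Lucas helper (A only calls it on naturals)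
def lucA : Nat → Int
  | 0 => 2
  | 1 => 1
  | n + 2 => lucA (n + 1) + lucA n

-- lucA n ≥ n: needed only for the termination measure of loopA
theorem lucA_ge (n : Nat) : (n : Int) ≤ lucA n := by
  match n with
  | 0 => norm_num [lucA]
  | 1 => norm_num [lucA]
  | 2 => norm_num [lucA]
  | n + 3 =>
    have h1 := lucA_ge (n + 2)
    have h2 := lucA_ge (n + 1)
    have e : lucA (n + 3) = lucA (n + 2) + lucA (n + 1) := rfl
    push_cast at *
    omega

-- A's while loop: state (n, current = lucA n, sum)
def loopA (H : Int) (n : Nat) (sum : Int) : Int :=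
  let current := lucA n
  if current < H then
    loopA H (n + 1) (if PySem.Int.mod current 2 = 0 then sum + current else sum)
  else sum
termination_by (H - n).toNat
decreasing_by
  have h := lucA_ge n
  simp only at *
  omega

def sumOfEvenLucasNumbers (highestNumber : Int) : Int :=
  loopA highestNumber 0 (if highestNumber = 2 then 2 else 0)

-- ===== PORT B =====
-- B's while loop over the pair (a, b) of consecutive Lucas numbers; the two proof
-- arguments only justify termination (they carry the invariant 0 ≤ a, 1 ≤ b)
def loopB (H a b total : Int) (ha : 0 ≤ a) (hb : 1 ≤ b) : Int :=
  if h : a < H then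
    loopB H b (a + b) (if PySem.Int.mod a 2 = 0 then total + a else total)
      (by omega) (by omega)
  else total
termination_by (H - a).toNat + (H - b).toNat
decreasing_by omega

def sumOfEvenLucasNumbers_alt (highestNumber : Int) : Int :=
  if highestNumber = 2 then 2
  else loopB highestNumber 2 1 0 (by norm_num) (by norm_num)

-- ===== PRECONDITION & SPEC =====
def Spec_sumOfEvenLucasNumbers (highestNumber : Int) (out : Int) : Prop := out = sumOfEvenLucasNumbers_alt highestNumber
instance (highestNumber : Int) (out : Int) : Decidable (Spec_sumOfEvenLucasNumbers highestNumber out) := by unfold Spec_sumOfEvenLucasNumbers; infer_instance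

-- ===== CLAIM (what is proved, stated in full; the proofs are below) =====
def Claim_equal_sumOfEvenLucasNumbers : Prop := ∀ (highestNumber : Int), Dom_sumOfEvenLucasNumbers highestNumber → Spec_sumOfEvenLucasNumbers highestNumber (sumOfEvenLucasNumbers highestNumber)

-- ===== LEMMAS AND PROOFS =====

-- one-step unfolding equations for the two loops
theorem loopA_eq (H : Int) (n : Nat) (s : Int) :
    loopA H n s = if lucA n < H then
      loopA H (n + 1) (if PySem.Int.mod (lucA n) 2 = 0 then s + lucA n else s) else s := by
  rw [loopA]

theorem loopB_eq (H a b total : Int) (ha : 0 ≤ a) (hb : 1 ≤ b) :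
    loopB H a b total ha hb = if h : a < H then
      loopB H b (a + b) (if PySem.Int.mod a 2 = 0 then total + a else total)
        (by omega) (by omega) else total := by
  rw [loopB]

-- both loops step through the same Lucas values with the same accumulator
theorem loop_eq (H : Int) (n : Nat) (s a b : Int) (ha : 0 ≤ a) (hb : 1 ≤ b)
    (ea : a = lucA n) (eb : b = lucA (n + 1)) :
    loopA H n s = loopB H a b s ha hb := by
  subst ea; subst eb
  rw [loopA_eq, loopB_eq]
  by_cases hlt : lucA n < H
  · rw [if_pos hlt, dif_pos hlt]
    exact loop_eq H (n + 1) _ _ _ _ _ rfl (by simp [lucA]; ring)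
  · rw [if_neg hlt, dif_neg hlt]
termination_by (H - n).toNat
decreasing_by
  have h := lucA_ge n
  omega

-- ===== VERDICT (by name: the statement is the Claim_ definition above) =====
theorem sumOfEvenLucasNumbers_spec : Claim_equal_sumOfEvenLucasNumbers := by
  intro H _
  unfold Spec_sumOfEvenLucasNumbers sumOfEvenLucasNumbers sumOfEvenLucasNumbers_alt
  by_cases h2 : H = 2
  · subst h2
    rw [loopA_eq]
    norm_num [lucA]
  · rw [if_neg h2, if_neg h2]
    exact loop_eq H 0 0 2 1 (by norm_num) (by norm_num)
      (by norm_num [lucA]) (by norm_num [lucA])
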